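-- pv_equiv track=rewrite | github.com/rcasteran/jarvis4se | src/jarvis/question_answer.py | merge_list_per_cons_prod
-- ===== SOURCE A (Python) =====
-- def merge_list_per_cons_prod(input_list):
--     """
--     Sorts data's name in alphabetical order and merges list by producer or consumer
--     Args:
--         input_list ([Data_name, funcion_name]): List of consumer/producer with data per Function
--
--     Returns:
--         Sorted + merged list
--     """
--     input_list = sorted(input_list)
--     output_list = []
--     empty_dict = {}
--     for data, obj_name in input_list:
--         if data not in empty_dict:
--             output_list.append([data, obj_name])
--             empty_dict[data] = len(empty_dict)
--         else:
--             if obj_name: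
--                 if obj_name not in output_list[empty_dict[data]][1]:
--                     output_list[empty_dict[data]][1] += '\\n' + obj_name
--
--     return output_list
-- ===== SOURCE B (Python) =====
-- def merge_list_per_cons_prod(input_list):
--     """
--     Sorts data's name in alphabetical order and merges list by producer or consumer.
--     Selection strategy: no global sort of the pairs; repeatedly pick the smallest
--     remaining data key, gather and sort that key's names, merge them, and drop
--     the key from the remaining rows.
--     """
--     output_list = []
--     remaining = list(input_list)
--     while remaining:
--         data = min(key for key, _ in remaining)
--         names = sorted(name for key, name in remaining if key == data)
--         merged = names[0]
--         for name in names[1:]: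
--             if name and name not in merged:
--                 merged += '\\n' + name
--         output_list.append([data, merged])
--         remaining = [entry for entry in remaining if entry[0] != data]
--     return output_list
-- ===== Notes on version B (the rewrite author's own statement) =====
-- stated objective: alternative
-- what changed: Instead of globally sorting the pair list and doing one pass with a data->index dictionary, B repeatedly selects the minimum remaining data key, gathers and sorts just that key's names, merges them into one entry, and filters the key out of the remaining rows (selection by key, no global sort, no index dict).
import Mathlib
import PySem

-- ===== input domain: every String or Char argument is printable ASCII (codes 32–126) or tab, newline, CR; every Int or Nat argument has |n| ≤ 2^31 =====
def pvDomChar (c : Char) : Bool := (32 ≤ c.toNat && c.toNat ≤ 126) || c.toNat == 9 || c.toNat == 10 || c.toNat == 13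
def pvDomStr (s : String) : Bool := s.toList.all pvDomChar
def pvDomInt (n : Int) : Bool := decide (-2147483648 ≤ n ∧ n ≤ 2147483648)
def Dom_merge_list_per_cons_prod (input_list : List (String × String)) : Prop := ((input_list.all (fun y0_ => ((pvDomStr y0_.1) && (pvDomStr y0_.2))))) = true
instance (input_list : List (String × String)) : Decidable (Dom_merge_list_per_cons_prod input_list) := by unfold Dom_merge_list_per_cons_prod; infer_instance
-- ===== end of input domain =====

-- B replaces A's global sort + indexed single pass by selection over the data
-- keys: repeatedly take the minimum remaining key, sort and merge that key's
-- names, and filter the key out; objective: alternative (same result, no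
-- global sort and no data->index dictionary).

-- ===== PORT A =====
-- loop body of A's 'for data, obj_name in input_list' (state = (output_list, empty_dict))
def AStep (st : List (String × String) × PySem.Dict String Nat) (p : String × String) :
    List (String × String) × PySem.Dict String Nat :=
  match st.2.get? p.1 with
  | none => (st.1 ++ [(p.1, p.2)], st.2.insert p.1 st.2.size)
  | some i =>
    if p.2 ≠ "" then
      let cur := st.1.getD i ("", "")
      if PySem.Str.isIn p.2 cur.2 = false then
        (st.1.set i (cur.1, cur.2 ++ "\\n" ++ p.2), st.2)
      else st
    else st

def merge_list_per_cons_prod (input_list : List (String × String)) : List (String × String) :=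
  (((PySem.List.sorted2 input_list Prod.fst Prod.snd)).foldl AStep ([], PySem.Dict.empty)).1

-- ===== PORT B =====
-- Source B's inner 'for name in names[1:]' body
def BMerge (acc : String) (n : String) : String :=
  if n ≠ "" ∧ PySem.Str.isIn n acc = false then acc ++ "\\n" ++ n else acc

-- Source B's 'while remaining' loop; the two '[]' fallbacks are totality guards for
-- branches that cannot occur ('remaining' is nonempty inside the loop, and the
-- minimum key always has at least one name)
def BSel : List (String × String) → List (String × String)
  | [] => []
  | q :: qs =>
    let d := (PySem.List.min? ((q :: qs).map Prod.fst) (fun x => x)).getD ""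
    match PySem.List.sorted (((q :: qs).filter (fun e => e.1 == d)).map Prod.snd) (fun x => x) false with
    | [] => []
    | n0 :: ns =>
      (d, ns.foldl BMerge n0) :: BSel ((q :: qs).filter (fun e => !(e.1 == d)))
termination_by l => l.length
decreasing_by
  cases hmv : PySem.List.min? ((q :: qs).map Prod.fst) (fun x => x) with
  | none =>
    have := (PySem.List.min?_eq_none_iff _ _).mp hmv
    simp at this
  | some m =>
    have hm := PySem.List.min?_mem hmv
    obtain ⟨e, he, hed⟩ := List.mem_map.mp hm
    refine List.length_filter_lt_length_iff_exists.mpr ⟨e, he, ?_⟩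
    simp [hed]

def merge_list_per_cons_prod_alt (input_list : List (String × String)) : List (String × String) :=
  BSel input_list

-- ===== PRECONDITION & SPEC =====
def Spec_merge_list_per_cons_prod (input_list : List (String × String)) (out : List (String × String)) : Prop := out = merge_list_per_cons_prod_alt input_list
instance (input_list : List (String × String)) (out : List (String × String)) : Decidable (Spec_merge_list_per_cons_prod input_list out) := by unfold Spec_merge_list_per_cons_prod; infer_instance

-- ===== CLAIM (what is proved, stated in full; the proofs are below) =====
def Claim_equal_merge_list_per_cons_prod : Prop := ∀ (input_list : List (String × String)), Dom_merge_list_per_cons_prod input_list → Spec_merge_list_per_cons_prod input_list (merge_list_per_cons_prod input_list)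

-- ===== LEMMAS AND PROOFS =====

-- lexicographic ≤ on pairs, the order sorted2 establishes
def LexLe (a b : String × String) : Prop := a.1 < b.1 ∨ (a.1 = b.1 ∧ a.2 ≤ b.2)

theorem lexLe_trans {a b c : String × String} (h1 : LexLe a b) (h2 : LexLe b c) : LexLe a c := by
  rcases h1 with h1 | ⟨h1, h1'⟩ <;> rcases h2 with h2 | ⟨h2, h2'⟩
  · exact Or.inl (lt_trans h1 h2)
  · exact Or.inl (h2 ▸ h1)
  · exact Or.inl (h1 ▸ h2)
  · exact Or.inr ⟨h1.trans h2, le_trans h1' h2'⟩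

-- insertBy preserves Pairwise R when `before` decides R one way or the other
theorem insertBy_pairwise_of {α : Type} (R : α → α → Prop) (htr : ∀ {a b c}, R a b → R b c → R a c)
    (before : α → α → Bool)
    (h1 : ∀ a b, before a b = true → R a b) (h2 : ∀ a b, before a b = false → R b a)
    (x : α) (ys : List α) (hp : ys.Pairwise R) :
    (PySem.List.insertBy before x ys).Pairwise R := by
  induction ys with
  | nil => simp [PySem.List.insertBy]
  | cons y ys ih =>
    rw [List.pairwise_cons] at hp
    obtain ⟨hy, hys⟩ := hp
    show (if before x y = true then x :: y :: ys else y :: PySem.List.insertBy before x ys).Pairwise R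
    by_cases hb : before x y = true
    · simp only [hb, if_true]
      refine List.Pairwise.cons ?_ (List.Pairwise.cons hy hys)
      intro z hz
      rcases List.mem_cons.mp hz with rfl | hz
      · exact h1 _ _ hb
      · exact htr (h1 _ _ hb) (hy z hz)
    · rw [if_neg hb]
      refine List.Pairwise.cons ?_ (ih hys)
      intro z hz
      rcases (PySem.List.insertBy_mem_iff before x z ys).mp hz with rfl | hz
      · exact h2 _ _ (by simpa using hb)
      · exact hy z hz

-- the sorted list is lexicographically nondecreasing
theorem sorted2_lex_pairwise (xs : List (String × String)) :
    (PySem.List.sorted2 xs Prod.fst Prod.snd).Pairwise LexLe := by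
  show (xs.foldl (fun acc x => PySem.List.insertBy _ x acc) []).Pairwise _
  generalize hacc : ([] : List (String × String)) = acc
  have hp : acc.Pairwise LexLe := by subst hacc; exact List.Pairwise.nil
  clear hacc
  induction xs generalizing acc with
  | nil => exact hp
  | cons x xs ih =>
    refine ih _ ?_
    refine insertBy_pairwise_of LexLe (fun hab hbc => lexLe_trans hab hbc) _ ?_ ?_ x acc hp
    · intro a b h
      simp at h
      rcases h with h | ⟨h, h'⟩
      · exact Or.inl (String.lt_iff_toList_lt.mpr h)
      · rcases lt_or_eq_of_le h with hlt | heq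
        · exact Or.inl (String.lt_iff_toList_lt.mpr hlt)
        · exact Or.inr ⟨String.toList_inj.mp heq, le_of_lt (String.lt_iff_toList_lt.mpr h')⟩
    · intro a b h
      simp at h
      obtain ⟨h1, h2⟩ := h
      by_cases he : a.1 = b.1
      · refine Or.inr ⟨he.symm, String.le_iff_toList_le.mpr (h2 ?_)⟩
        exact le_of_eq (congrArg String.toList he)
      · refine Or.inl (lt_of_le_of_ne (String.le_iff_toList_le.mpr h1) (Ne.symm he))

theorem sorted2_fst_pairwise (xs : List (String × String)) :
    (PySem.List.sorted2 xs Prod.fst Prod.snd).Pairwise (fun a b => a.1 ≤ b.1) := by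
  refine (sorted2_lex_pairwise xs).imp ?_
  intro a b h
  rcases h with h | ⟨h, -⟩
  · exact le_of_lt h
  · exact le_of_eq h

-- any lexicographically nondecreasing rearrangement of xs IS sorted2 xs
theorem sorted2_eq_of_perm_of_pairwise_lex (xs ys : List (String × String))
    (hperm : ys.Perm xs) (hp : ys.Pairwise LexLe) :
    PySem.List.sorted2 xs Prod.fst Prod.snd = ys := by
  refine List.Perm.eq_of_pairwise ?_ (sorted2_lex_pairwise xs) hp
    ((PySem.List.sorted2_perm xs Prod.fst Prod.snd false).trans hperm.symm)
  intro a b _ _ hab hba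
  rcases hab with h1 | ⟨h1, h1'⟩ <;> rcases hba with h2 | ⟨h2, h2'⟩
  · exact absurd (lt_trans h1 h2) (lt_irrefl a.1)
  · exact absurd h1 (h2 ▸ lt_irrefl b.1)
  · exact absurd h2 (h1 ▸ lt_irrefl a.1)
  · exact Prod.ext h1 (le_antisymm h1' h2')

-- A's loop body restricted to a row with the last-appended entry's key
def BMergeP (acc : String) (p : String × String) : String := BMerge acc p.2

-- BGroup: the merged output of A on an already-sorted list, run by run (a proof
-- device characterising A's fold; B itself never sorts globally)
def BGroup : List (String × String) → List (String × String)
  | [] => []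
  | p :: rest =>
    (p.1, (rest.takeWhile (fun q => q.1 == p.1)).foldl BMergeP p.2)
      :: BGroup (rest.dropWhile (fun q => q.1 == p.1))
termination_by l => l.length
decreasing_by
  simp only [List.length_cons]
  exact Nat.lt_succ_of_le (List.length_dropWhile_le _ _)

-- A's loop over one run of rows whose data equals the last-appended entry's key:
-- it only edits that last entry
theorem A_run (run : List (String × String)) (dkey : String)
    (hrun : ∀ q ∈ run, q.1 = dkey)
    (out : List (String × String)) (dict : PySem.Dict String Nat) (acc : String)
    (hd : dict.get? dkey = some out.length) :
    run.foldl AStep (out ++ [(dkey, acc)], dict)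
      = (out ++ [(dkey, run.foldl BMergeP acc)], dict) := by
  induction run generalizing acc with
  | nil => simp
  | cons q run ih =>
    have hq : q.1 = dkey := hrun q (List.mem_cons_self)
    have hrun' : ∀ p ∈ run, p.1 = dkey := fun p hp => hrun p (List.mem_cons_of_mem _ hp)
    have hget : (out ++ [(dkey, acc)]).getD out.length ("", "") = (dkey, acc) := by
      rw [List.getD_eq_getElem?_getD, List.getElem?_concat_length]; rfl
    have hset : ∀ s : String,
        (out ++ [(dkey, acc)]).set out.length (dkey, s) = out ++ [(dkey, s)] := by
      intro s
      rw [List.set_append]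
      simp
    simp only [List.foldl_cons]
    have hstep : AStep (out ++ [(dkey, acc)], dict) q
        = (out ++ [(dkey, BMergeP acc q)], dict) := by
      unfold AStep BMergeP BMerge
      rw [hq, hd]
      simp only [hget]
      by_cases h2 : q.2 = ""
      · simp [h2]
      · by_cases h3 : PySem.Str.isIn q.2 acc = false
        all_goals rw [PySem.Str.isIn_eq] at h3
        · simp [h2, h3, hset]
        · simp [h2, h3]
    rw [hstep, ih hrun' (BMergeP acc q)]

-- every remaining data key in a sorted tail strictly exceeds the dropped run's key
theorem drop_ne_key (rest : List (String × String)) (dkey : String)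
    (hpw : rest.Pairwise (fun a b => a.1 ≤ b.1))
    (hge : ∀ q ∈ rest, dkey ≤ q.1) :
    ∀ q ∈ rest.dropWhile (fun q => q.1 == dkey), q.1 ≠ dkey := by
  have hsub := List.dropWhile_sublist (l := rest) (fun q => q.1 == dkey)
  have hpw2 : (rest.dropWhile (fun q => q.1 == dkey)).Pairwise (fun a b => a.1 ≤ b.1) :=
    hpw.sublist hsub
  cases hh : rest.dropWhile (fun q => q.1 == dkey) with
  | nil => simp
  | cons h t =>
    have hhead : ¬ ((h.1 == dkey) = true) := by
      have := List.head?_dropWhile_not (p := fun q => q.1 == dkey) (l := rest)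
      rw [hh] at this
      simp at this
      simp [this]
    have hne : h.1 ≠ dkey := by simpa using hhead
    have hlt : dkey < h.1 := by
      have : dkey ≤ h.1 := hge h (hsub.mem (hh ▸ List.mem_cons_self))
      exact lt_of_le_of_ne this (Ne.symm hne)
    intro q hq
    rcases List.mem_cons.mp hq with rfl | hq
    · exact hne
    · rw [hh] at hpw2
      have : h.1 ≤ q.1 := (List.pairwise_cons.mp hpw2).1 q hq
      exact Ne.symm (ne_of_lt (lt_of_lt_of_le hlt this))

-- main invariant: A's fold over a sorted list of fresh keys appends B's groups
theorem A_main (l : List (String × String)) (hpw : l.Pairwise (fun a b => a.1 ≤ b.1))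
    (out : List (String × String)) (dict : PySem.Dict String Nat)
    (hfresh : ∀ q ∈ l, dict.contains q.1 = false)
    (hsz : dict.size = out.length) :
    (l.foldl AStep (out, dict)).1 = out ++ BGroup l := by
  induction hn : l.length using Nat.strong_induction_on generalizing l out dict with
  | _ n ih =>
    cases l with
    | nil => simp [BGroup]
    | cons p rest =>
      have hpfresh : dict.contains p.1 = false := hfresh p List.mem_cons_self
      have hnone : dict.get? p.1 = none :=
        (PySem.Dict.get?_eq_none_iff_contains dict p.1).mpr hpfresh
      have hstep : AStep (out, dict) p
          = (out ++ [(p.1, p.2)], dict.insert p.1 dict.size) := by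
        unfold AStep; rw [hnone]
      set run := rest.takeWhile (fun q => q.1 == p.1) with hrundef
      set rest2 := rest.dropWhile (fun q => q.1 == p.1) with hrest2def
      have hsplit : run ++ rest2 = rest := List.takeWhile_append_dropWhile
      have hpwrest : rest.Pairwise (fun a b => a.1 ≤ b.1) := (List.pairwise_cons.mp hpw).2
      have hge : ∀ q ∈ rest, p.1 ≤ q.1 := (List.pairwise_cons.mp hpw).1
      have hdict' : (dict.insert p.1 dict.size).get? p.1 = some out.length := by
        rw [PySem.Dict.get?_insert_self, hsz]
      have hrun : ∀ q ∈ run, q.1 = p.1 := by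
        intro q hq
        simpa using List.mem_takeWhile_imp hq
      have hfold : (p :: rest).foldl AStep (out, dict)
          = rest2.foldl AStep (out ++ [(p.1, run.foldl BMergeP p.2)], dict.insert p.1 dict.size) := by
        rw [List.foldl_cons, hstep, ← hsplit, List.foldl_append,
          A_run run p.1 hrun out (dict.insert p.1 dict.size) p.2 hdict']
      rw [hfold]
      have hne2 : ∀ q ∈ rest2, q.1 ≠ p.1 := drop_ne_key rest p.1 hpwrest hge
      have hsub2 : rest2.Sublist rest := List.dropWhile_sublist _
      have hres := ih rest2.length
        (by
          have h1 : rest2.length ≤ rest.length := List.length_dropWhile_le _ _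
          have h2 : rest.length + 1 = n := by simpa using hn
          omega)
        rest2 (hpwrest.sublist hsub2)
        (out ++ [(p.1, run.foldl BMergeP p.2)]) (dict.insert p.1 dict.size)
        (by
          intro q hq
          rw [PySem.Dict.contains_insert]
          have h1 : (q.1 == p.1) = false := by
            simpa using hne2 q hq
          rw [h1, Bool.false_or]
          exact hfresh q (List.mem_cons_of_mem _ (hsub2.mem hq)))
        (by
          rw [PySem.Dict.size_insert, hpfresh]
          simp [hsz])
        rfl
      rw [hres]
      show _ = out ++ BGroup (p :: rest)
      rw [BGroup]
      simp
      exact ⟨rfl, rfl⟩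

-- B's selection recursion computes the groups of the sorted list
theorem BSel_eq_BGroup_sorted (xs : List (String × String)) :
    BSel xs = BGroup (PySem.List.sorted2 xs Prod.fst Prod.snd) := by
  induction hn : xs.length using Nat.strong_induction_on generalizing xs with
  | _ n ih =>
    have hperm := PySem.List.sorted2_perm xs Prod.fst Prod.snd false
    cases hxs : xs with
    | nil =>
      subst hxs
      have hs : PySem.List.sorted2 ([] : List (String × String)) Prod.fst Prod.snd = [] := rfl
      rw [BSel, hs]
      simp [BGroup]
    | cons q qs =>
      subst hxs
      set s := PySem.List.sorted2 (q :: qs) Prod.fst Prod.snd with hsdef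
      have hslen : s.length = (q :: qs).length := hperm.length_eq
      cases hs : s with
      | nil => rw [hs] at hslen; simp at hslen
      | cons p rest =>
        have hlex : (p :: rest).Pairwise LexLe := hs ▸ sorted2_lex_pairwise (q :: qs)
        have hfst : (p :: rest).Pairwise (fun a b => a.1 ≤ b.1) :=
          hs ▸ sorted2_fst_pairwise (q :: qs)
        have hge : ∀ r ∈ rest, p.1 ≤ r.1 := (List.pairwise_cons.mp hfst).1
        have hpwrest : rest.Pairwise (fun a b => a.1 ≤ b.1) := (List.pairwise_cons.mp hfst).2
        set run := rest.takeWhile (fun r => r.1 == p.1) with hrundef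
        set rest2 := rest.dropWhile (fun r => r.1 == p.1) with hrest2def
        have hpmem : p ∈ (q :: qs) := hperm.mem_iff.mp (hs ▸ List.mem_cons_self)
        -- value of the min
        have hminval : PySem.List.min? ((q :: qs).map Prod.fst) (fun x => x) = some p.1 := by
          cases hmv : PySem.List.min? ((q :: qs).map Prod.fst) (fun x => x) with
          | none =>
            have := (PySem.List.min?_eq_none_iff _ _).mp hmv
            simp at this
          | some d =>
            have hdm := PySem.List.min?_mem hmv
            obtain ⟨e, he, hed⟩ := List.mem_map.mp hdm
            have hes : e ∈ p :: rest := (hs ▸ hperm.mem_iff.mpr he)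
            have hple : p.1 ≤ d := by
              rcases List.mem_cons.mp hes with rfl | hes
              · exact le_of_eq hed
              · exact hed ▸ hge e hes
            have hdle : d ≤ p.1 := by
              have := PySem.List.min?_isMin hmv p.1 (List.mem_map.mpr ⟨p, hpmem, rfl⟩)
              simpa using this
            rw [le_antisymm hdle hple]
        -- the rows with the minimal key, in sorted order
        have hfilter_run : (p :: rest).filter (fun e => e.1 == p.1) = p :: run := by
          have h1 : rest.filter (fun e => e.1 == p.1) = run := by
            rw [← List.takeWhile_append_dropWhile (p := fun r => r.1 == p.1) (l := rest),
              List.filter_append]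
            have ht : run.filter (fun e => e.1 == p.1) = run := by
              refine List.filter_eq_self.mpr ?_
              intro a ha
              rw [hrundef] at ha
              exact List.mem_takeWhile_imp (p := fun e : String × String => e.1 == p.1) ha
            have hd : rest2.filter (fun e => e.1 == p.1) = [] := by
              refine List.filter_eq_nil_iff.mpr ?_
              intro a ha
              simpa using drop_ne_key rest p.1 hpwrest hge a ha
            rw [← hrundef, ← hrest2def] at *
            rw [ht, hd, List.append_nil]
          simp [h1]
        have hfilter_rest : (p :: rest).filter (fun e => !(e.1 == p.1)) = rest2 := by
          have h1 : rest.filter (fun e => !(e.1 == p.1)) = rest2 := by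
            rw [← List.takeWhile_append_dropWhile (p := fun r => r.1 == p.1) (l := rest),
              List.filter_append]
            have ht : run.filter (fun e => !(e.1 == p.1)) = [] := by
              refine List.filter_eq_nil_iff.mpr ?_
              intro a ha
              have := List.mem_takeWhile_imp ha
              simp_all
            have hd : rest2.filter (fun e => !(e.1 == p.1)) = rest2 := by
              refine List.filter_eq_self.mpr ?_
              intro a ha
              simpa using drop_ne_key rest p.1 hpwrest hge a ha
            rw [← hrundef, ← hrest2def] at *
            rw [ht, hd, List.nil_append]
          simp [h1]
        -- the sorted names of the minimal key
        have hnames : PySem.List.sorted (((q :: qs).filter (fun e => e.1 == p.1)).map Prod.snd)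
            (fun x => x) false = p.2 :: run.map Prod.snd := by
          refine PySem.List.sorted_id_eq_of_perm_of_pairwise _ _ ?_ ?_
          · have hpf : ((p :: rest).filter (fun e => e.1 == p.1)).Perm
                ((q :: qs).filter (fun e => e.1 == p.1)) := (hs ▸ hperm).filter _
            have := (hfilter_run ▸ hpf).map Prod.snd
            simpa using this
          · have hsubrun : (p :: run).Sublist (p :: rest) :=
              List.Sublist.cons₂ p (List.takeWhile_sublist _)
            have hlexrun : (p :: run).Pairwise LexLe := hlex.sublist hsubrun
            have : ((p :: run).map Prod.snd).Pairwise (· ≤ ·) := by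
              refine List.pairwise_map.mpr ?_
              refine hlexrun.imp_of_mem ?_
              intro a b ha hb hab
              have hkeya : a.1 = p.1 := by
                rcases List.mem_cons.mp ha with rfl | ha
                · rfl
                · rw [hrundef] at ha
                  simpa using List.mem_takeWhile_imp (p := fun r : String × String => r.1 == p.1) ha
              have hkeyb : b.1 = p.1 := by
                rcases List.mem_cons.mp hb with rfl | hb
                · rfl
                · rw [hrundef] at hb
                  simpa using List.mem_takeWhile_imp (p := fun r : String × String => r.1 == p.1) hb
              rcases hab with h | ⟨-, h⟩
              · rw [hkeya, hkeyb] at h; exact absurd h (lt_irrefl _)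
              · exact h
            simpa using this
        -- the remaining rows sort to the dropped tail
        have hrest2sorted : PySem.List.sorted2 ((q :: qs).filter (fun e => !(e.1 == p.1)))
            Prod.fst Prod.snd = rest2 := by
          refine sorted2_eq_of_perm_of_pairwise_lex _ _ ?_ ?_
          · have hpf : ((p :: rest).filter (fun e => !(e.1 == p.1))).Perm
                ((q :: qs).filter (fun e => !(e.1 == p.1))) := (hs ▸ hperm).filter _
            exact hfilter_rest ▸ hpf
          · exact hlex.sublist (List.Sublist.cons p (List.dropWhile_sublist _))
        -- strictly fewer rows remain
        have hlt : ((q :: qs).filter (fun e => !(e.1 == p.1))).length < (q :: qs).length := by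
          refine List.length_filter_lt_length_iff_exists.mpr ⟨p, hpmem, by simp⟩
        -- unfold one step of BSel
        rw [BSel.eq_def]
        dsimp only
        rw [hminval]
        dsimp only [Option.getD_some]
        rw [hnames]
        have hrec : BSel ((q :: qs).filter (fun e => !(e.1 == p.1)))
            = BGroup (PySem.List.sorted2 ((q :: qs).filter (fun e => !(e.1 == p.1)))
                Prod.fst Prod.snd) := by
          exact ih _ (hn ▸ hlt) _ rfl
        rw [hrec, hrest2sorted, BGroup]
        dsimp only
        simp only [List.foldl_map]
        rfl

-- ===== VERDICT (by name: the statement is the Claim_ definition above) =====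
theorem merge_list_per_cons_prod_spec : Claim_equal_merge_list_per_cons_prod := by
  intro input_list _
  show merge_list_per_cons_prod input_list = merge_list_per_cons_prod_alt input_list
  unfold merge_list_per_cons_prod merge_list_per_cons_prod_alt
  rw [A_main _ (sorted2_fst_pairwise input_list) [] PySem.Dict.empty
    (fun q _ => PySem.Dict.contains_empty q.1) (by simp [PySem.Dict.size_empty]),
    BSel_eq_BGroup_sorted]
  simp
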